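-- pv_equiv track=rewrite | github.com/Sourish2/Digital-Sherpa | document_text_extraction.py | clean_kv
-- ===== SOURCE A (Python) =====
-- import itertools
--
-- def clean_kv(entry, keys):
--     if not entry:
--         return None, None
--     keys = sorted(keys, key=len, reverse=True)
--     entry = entry.split("\n")
--     if len(entry) == 1:
--         for key in keys:
--             if key in entry[0]:
--                 return key, entry[0].replace(key, "").strip()
--     else:
--         words = " ".join(entry).split()
--         for i in range(1, len(words) + 1):
--             for combo in itertools.combinations(words, i):
--                 candidate_key = " ".join(combo)
--                 if candidate_key in keys:
--                     remaining_words = words.copy()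
--                     for word in combo:
--                         if word in remaining_words:
--                             remaining_words.remove(word)
--                     return candidate_key, " ".join(remaining_words).strip()
--     return None, None
-- ===== SOURCE B (Python) =====
-- def _greedy_positions(tokens, words):
--     """Earliest (lexicographically least) index positions matching tokens as a
--     subsequence of words, or None if tokens is not a subsequence."""
--     pos = []
--     j = 0
--     for t in tokens:
--         while j < len(words) and words[j] != t:
--             j += 1
--         if j >= len(words):
--             return None
--         pos.append(j)
--         j += 1
--     return pos
--
--
-- def clean_kv(entry, keys):
--     if not entry:
--         return None, None
--     lines = entry.split("\n")
--     if len(lines) == 1: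
--         for key in sorted(keys, key=len, reverse=True):
--             if key in lines[0]:
--                 return key, lines[0].replace(key, "").strip()
--         return None, None
--     words = " ".join(lines).split()
--     best = None  # (rank, key, tokens) with rank = (token count, positions)
--     for key in keys:
--         tokens = key.split()
--         if not tokens or " ".join(tokens) != key:
--             continue  # key can never equal a space-joined combination of words
--         pos = _greedy_positions(tokens, words)
--         if pos is None:
--             continue
--         rank = (len(tokens), pos)
--         if best is None or rank < best[0]:
--             best = (rank, key, tokens)
--     if best is None:
--         return None, None
--     _, key, tokens = best
--     remaining = words.copy()
--     for t in tokens: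
--         remaining.remove(t)
--     return key, " ".join(remaining).strip()
-- ===== Notes on version B (the rewrite author's own statement) =====
-- stated objective: alternative
-- what changed: The multiline branch no longer enumerates word combinations (O(2^n) in A); for each key B tests its tokens as a subsequence of the words via a greedy earliest-positions scan and picks the key minimising (token count, position tuple), which is exactly the first combination A's enumeration would hit; intended as asymptotically faster on many-word multiline entries, but the random a timing run measured only 1.32x at the largest size, so no speed is claimed.
import Mathlib
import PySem

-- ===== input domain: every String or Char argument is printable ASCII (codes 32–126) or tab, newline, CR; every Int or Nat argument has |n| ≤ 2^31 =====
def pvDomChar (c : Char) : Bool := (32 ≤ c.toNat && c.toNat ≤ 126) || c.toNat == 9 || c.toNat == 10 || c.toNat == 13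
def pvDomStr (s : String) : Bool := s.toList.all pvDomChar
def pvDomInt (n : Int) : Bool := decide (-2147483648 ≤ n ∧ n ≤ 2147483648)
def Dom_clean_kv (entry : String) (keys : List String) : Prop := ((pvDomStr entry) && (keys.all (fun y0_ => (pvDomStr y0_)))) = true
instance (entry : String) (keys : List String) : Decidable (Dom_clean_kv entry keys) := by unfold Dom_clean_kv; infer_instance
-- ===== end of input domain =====

-- B replaces A's enumeration of all word combinations by a per-key greedy subsequence
-- match picking the key with minimal (token count, earliest positions): a different algorithm.

-- ===== PORT A =====

-- " ".join(ws)  (shared by both ports)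
def pvJoin (ws : List String) : String := PySem.Str.join " " ws

-- the single-line branch: 'for key in keys: if key in line: return …' (B's Python has the same loop)
def pvLineScan : List String → String → Option String × Option String
  | [], _ => (none, none)
  | k :: ks, line =>
      if PySem.Str.isIn k line then
        (some k, some (PySem.Str.strip (PySem.Str.replace line k "")))
      else pvLineScan ks line

-- 'remaining = words.copy(); for word in combo: if word in remaining: remaining.remove(word)'
def pvRemoveGuard (words combo : List String) : List String :=
  combo.foldl (fun rem w => if rem.contains w then (PySem.List.remove? rem w).getD rem else rem) words

-- 'for i in range(1, len(words)+1): for combo in itertools.combinations(words, i): …'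
def pvComboScan (keys words : List String) : List Nat → Option String × Option String
  | [] => (none, none)
  | i :: rest =>
      match (PySem.List.combinations words i).find? (fun c => keys.contains (pvJoin c)) with
      | some c => (some (pvJoin c), some (PySem.Str.strip (pvJoin (pvRemoveGuard words c))))
      | none => pvComboScan keys words rest

def clean_kv (entry : String) (keys : List String) : Option String × Option String :=
  if entry = "" then (none, none) else
  let skeys := PySem.List.sorted keys (fun k => PySem.Str.len k) true
  let lines := (PySem.Str.split? entry "\n").getD []
  if lines.length = 1 then pvLineScan skeys (lines.headD "")
  else
    let words := PySem.Str.split₀ (pvJoin lines)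
    pvComboScan skeys words (List.range' 1 words.length)

-- ===== PORT B =====

-- greedy earliest-positions subsequence match (the 'while words[j] != t: j += 1' scan)
def pvGreedy : List String → List String → Nat → Option (List Nat)
  | [], _, _ => some []
  | _ :: _, [], _ => none
  | t :: ts, w :: ws, j =>
      if w = t then (pvGreedy ts ws (j + 1)).map (j :: ·)
      else pvGreedy (t :: ts) ws (j + 1)

-- Python's '<' on lists of ints (lexicographic, proper prefix is smaller)
def pvIdxLt : List Nat → List Nat → Bool
  | _, [] => false
  | [], _ :: _ => true
  | a :: as, b :: bs => a < b || (a == b && pvIdxLt as bs)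

-- Python's '<' on (int, int list) rank tuples
def pvRankLt (a b : Nat × List Nat) : Bool := a.1 < b.1 || (a.1 == b.1 && pvIdxLt a.2 b.2)

-- one step of the key loop: 'if best is None or rank < best[0]: best = (rank, key, tokens)'
def pvBestStep (words : List String) (best : Option (String × List String × Nat × List Nat))
    (k : String) : Option (String × List String × Nat × List Nat) :=
  let t := PySem.Str.split₀ k
  if t.isEmpty || pvJoin t ≠ k then best else
  match pvGreedy t words 0 with
  | none => best
  | some js =>
      match best with
      | none => some (k, t, t.length, js)
      | some b => if pvRankLt (t.length, js) (b.2.2.1, b.2.2.2) then some (k, t, t.length, js) else some b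

def pvBest (words keys : List String) : Option (String × List String × Nat × List Nat) :=
  keys.foldl (pvBestStep words) none

-- 'for t in tokens: remaining.remove(t)' (each token is present, so .remove never raises)
def pvEraseAll (words t : List String) : List String :=
  t.foldl (fun rem w => (PySem.List.remove? rem w).getD rem) words

def clean_kv_alt (entry : String) (keys : List String) : Option String × Option String :=
  if entry = "" then (none, none) else
  let lines := (PySem.Str.split? entry "\n").getD []
  if lines.length = 1 then
    pvLineScan (PySem.List.sorted keys (fun k => PySem.Str.len k) true) (lines.headD "")
  else
    let words := PySem.Str.split₀ (pvJoin lines)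
    match pvBest words keys with
    | some (k, t, _, _) => (some k, some (PySem.Str.strip (pvJoin (pvEraseAll words t))))
    | none => (none, none)

-- ===== PRECONDITION & SPEC =====
def Spec_clean_kv (entry : String) (keys : List String) (out : Option String × Option String) : Prop := out = clean_kv_alt entry keys
instance (entry : String) (keys : List String) (out : Option String × Option String) : Decidable (Spec_clean_kv entry keys out) := by unfold Spec_clean_kv; infer_instance

-- ===== CLAIM (what is proved, stated in full; the proofs are below) =====
def Claim_equal_clean_kv : Prop := ∀ (entry : String) (keys : List String), Dom_clean_kv entry keys → Spec_clean_kv entry keys (clean_kv entry keys)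

-- ===== LEMMAS AND PROOFS =====

-- a "word": nonempty, whitespace-free (what split() produces)
def pvGoodW (w : List Char) : Prop := w ≠ [] ∧ ∀ c ∈ w, PySem.Chars.isspace c = false

-- B-side candidate notion: key k can be matched, with greedy positions js
def pvIsCand (words : List String) (k : String) (js : List Nat) : Prop :=
  PySem.Str.split₀ k ≠ [] ∧ pvJoin (PySem.Str.split₀ k) = k ∧
    pvGreedy (PySem.Str.split₀ k) words 0 = some js

def pvGoodCand (words : List String) (b : String × List String × Nat × List Nat) : Prop :=
  b.2.1 = PySem.Str.split₀ b.1 ∧ b.2.2.1 = b.2.1.length ∧ pvIsCand words b.1 b.2.2.2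

lemma pv_split₀_good (s : List Char) : ∀ w ∈ PySem.Chars.split₀ s, pvGoodW w := by
  have key : ∀ (s cur : List Char) (acc : List (List Char)),
      (∀ c ∈ cur, PySem.Chars.isspace c = false) → (∀ w ∈ acc, pvGoodW w) →
      ∀ w ∈ PySem.Chars.split₀.go s cur acc, pvGoodW w := by
    intro s
    induction s with
    | nil =>
        intro cur acc hcur hacc w hw
        simp only [PySem.Chars.split₀.go] at hw
        by_cases h : cur.isEmpty
        · simp [h] at hw; exact hacc _ hw
        · simp [h] at hw
          rcases hw with hw | hw
          · exact hacc _ hw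
          · subst hw
            refine ⟨by simpa using (by simpa [List.isEmpty_iff] using h), ?_⟩
            intro c hc; exact hcur c (by simpa using hc)
    | cons c rest ih =>
        intro cur acc hcur hacc w hw
        simp only [PySem.Chars.split₀.go] at hw
        by_cases h : PySem.Chars.isspace c
        · by_cases h2 : cur.isEmpty
          · simp only [h, h2, if_true] at hw
            exact ih [] acc (by simp) hacc w hw
          · simp only [h, h2, if_true, if_false] at hw
            refine ih [] (cur.reverse :: acc) (by simp) ?_ w hw
            intro v hv
            rcases List.mem_cons.mp hv with hv | hv
            · subst hv
              exact ⟨by simpa [List.isEmpty_iff] using h2, fun d hd => hcur d (by simpa using hd)⟩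
            · exact hacc _ hv
        · simp only [h, if_false] at hw
          refine ih (c :: cur) acc ?_ hacc w hw
          intro d hd
          rcases List.mem_cons.mp hd with hd | hd
          · subst hd; simpa using h
          · exact hcur d hd
  intro w hw
  exact key s [] [] (by simp) (by simp) w hw

lemma pv_go_word (p : List Char) (hp : ∀ c ∈ p, PySem.Chars.isspace c = false) :
    ∀ (s cur : List Char) (acc : List (List Char)),
      PySem.Chars.split₀.go (p ++ s) cur acc = PySem.Chars.split₀.go s (p.reverse ++ cur) acc := by
  induction p with
  | nil => intro s cur acc; simp
  | cons c p' ih =>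
      intro s cur acc
      have hc : PySem.Chars.isspace c = false := hp c (by simp)
      simp only [List.cons_append, PySem.Chars.split₀.go, hc, Bool.false_eq_true, if_false]
      rw [ih (fun d hd => hp d (by simp [hd])) s (c :: cur) acc]
      simp

lemma pv_roundtrip (parts : List (List Char)) (h : ∀ p ∈ parts, pvGoodW p) :
    PySem.Chars.split₀ (PySem.Chars.join [' '] parts) = parts := by
  have key : ∀ (parts : List (List Char)) (acc : List (List Char)), (∀ p ∈ parts, pvGoodW p) →
      PySem.Chars.split₀.go (PySem.Chars.join [' '] parts) [] acc = acc.reverse ++ parts := by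
    intro parts
    induction parts with
    | nil => intro acc _; simp [PySem.Chars.join, List.intercalate, PySem.Chars.split₀.go]
    | cons p rest ih =>
        intro acc hg
        obtain ⟨hp1, hp2⟩ := hg p (by simp)
        cases rest with
        | nil =>
            have hj : PySem.Chars.join [' '] [p] = p ++ [] := by
              simp [PySem.Chars.join, List.intercalate]
            rw [hj, pv_go_word p hp2 [] [] acc]
            simp only [PySem.Chars.split₀.go, List.append_nil]
            have : (p.reverse ++ ([] : List Char)).isEmpty = false := by
              simp [List.isEmpty_iff, hp1]
            rw [if_neg (by simp [this, List.isEmpty_iff, hp1])]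
            simp
        | cons q rest' =>
            have hj : PySem.Chars.join [' '] (p :: q :: rest')
                = p ++ ' ' :: PySem.Chars.join [' '] (q :: rest') := by
              simp [PySem.Chars.join, List.intercalate]
            rw [hj, pv_go_word p hp2 _ [] acc]
            simp only [PySem.Chars.split₀.go]
            have hsp : PySem.Chars.isspace ' ' = true := by decide
            rw [if_pos hsp]
            have : (p.reverse ++ ([] : List Char)).isEmpty = false := by
              simp [List.isEmpty_iff, hp1]
            rw [if_neg (by simp [List.isEmpty_iff, hp1])]
            simp only [List.append_nil, List.reverse_reverse]
            rw [ih (p :: acc) (fun r hr => hg r (by simp [hr]))]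
            simp
  have := key parts [] h
  simpa [PySem.Chars.split₀] using this

lemma pvIdxLt_irrefl (a : List Nat) : pvIdxLt a a = false := by
  induction a with
  | nil => rfl
  | cons x xs ih => simp [pvIdxLt, ih]

lemma pvIdxLt_trans : ∀ {a b c : List Nat}, pvIdxLt a b = true → pvIdxLt b c = true →
    pvIdxLt a c = true := by
  intro a
  induction a with
  | nil =>
      intro b c h1 h2
      cases b with
      | nil => simpa [pvIdxLt] using h1
      | cons y ys => cases c with
        | nil => simpa [pvIdxLt] using h2
        | cons z zs => simp [pvIdxLt]
  | cons x xs ih =>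
      intro b c h1 h2
      cases b with
      | nil => simp [pvIdxLt] at h1
      | cons y ys =>
        cases c with
        | nil => simp [pvIdxLt] at h2
        | cons z zs =>
            simp only [pvIdxLt, Bool.or_eq_true, Bool.and_eq_true, beq_iff_eq,
              decide_eq_true_eq] at h1 h2 ⊢
            rcases h1 with h1 | ⟨rfl, h1⟩
            · rcases h2 with h2 | ⟨rfl, h2⟩
              · exact Or.inl (Nat.lt_trans h1 h2)
              · exact Or.inl h1
            · rcases h2 with h2 | ⟨rfl, h2⟩
              · exact Or.inl h2
              · exact Or.inr ⟨rfl, ih h1 h2⟩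

lemma pvIdxLt_tricho : ∀ {a b : List Nat}, pvIdxLt a b = false → a = b ∨ pvIdxLt b a = true := by
  intro a
  induction a with
  | nil =>
      intro b h
      cases b with
      | nil => exact Or.inl rfl
      | cons y ys => simp [pvIdxLt] at h
  | cons x xs ih =>
      intro b h
      cases b with
      | nil => exact Or.inr (by simp [pvIdxLt])
      | cons y ys =>
          simp only [pvIdxLt, Bool.or_eq_false_iff, Bool.and_eq_false_iff, beq_iff_eq,
            decide_eq_false_iff_not] at h
          obtain ⟨hxy, h2⟩ := h
          rcases Nat.lt_or_ge y x with hyx | hge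
          · exact Or.inr (by simp [pvIdxLt, hyx])
          · have : x = y := Nat.le_antisymm hge (Nat.le_of_not_lt hxy)
            subst this
            rcases h2 with h2 | h2
            · simp at h2
            · rcases ih h2 with rfl | h3
              · exact Or.inl rfl
              · exact Or.inr (by simp [pvIdxLt, h3])

lemma pvIdxLt_not_lt_trans {a b c : List Nat} (h1 : pvIdxLt a b = false)
    (h2 : pvIdxLt b c = false) : pvIdxLt a c = false := by
  cases hlt : pvIdxLt a c with
  | false => rfl
  | true =>
      exfalso
      rcases pvIdxLt_tricho h1 with heq | h3
      · rw [heq] at hlt; exact absurd hlt (by simpa using h2)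
      · rcases pvIdxLt_tricho h2 with heq | h4
        · rw [heq] at h3
          have := pvIdxLt_trans h3 hlt
          simp [pvIdxLt_irrefl] at this
        · have := pvIdxLt_trans (pvIdxLt_trans h4 h3) hlt
          simp [pvIdxLt_irrefl] at this

lemma pvRankLt_irrefl (a : Nat × List Nat) : pvRankLt a a = false := by
  simp [pvRankLt, pvIdxLt_irrefl]

lemma pvRankLt_not_lt_trans {a b c : Nat × List Nat} (h1 : pvRankLt a b = false)
    (h2 : pvRankLt b c = false) : pvRankLt a c = false := by
  simp only [pvRankLt, Bool.or_eq_false_iff, Bool.and_eq_false_iff, beq_eq_false_iff_ne,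
    decide_eq_false_iff_not] at h1 h2 ⊢
  obtain ⟨hab, hab2⟩ := h1
  obtain ⟨hbc, hbc2⟩ := h2
  refine ⟨by omega, ?_⟩
  by_cases hac : a.1 = c.1
  · right
    have hb1 : a.1 = b.1 ∧ b.1 = c.1 := by omega
    rcases hab2 with h' | h'
    · exact absurd hb1.1 h'
    · rcases hbc2 with h'' | h''
      · exact absurd hb1.2 h''
      · exact pvIdxLt_not_lt_trans h' h''
  · exact Or.inl hac

lemma pv_sublist_range'_aux : ∀ (n s : Nat) (js : List Nat), js.Pairwise (· < ·) →
    (∀ x ∈ js, s ≤ x ∧ x < s + n) → js.Sublist (List.range' s n) := by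
  intro n
  induction n with
  | zero =>
      intro s js hp hb
      cases js with
      | nil => simp
      | cons a js' => have := hb a (by simp); omega
  | succ m ih =>
      intro s js hp hb
      cases js with
      | nil => simp
      | cons a js' =>
          rw [List.range'_succ]
          obtain ⟨has, han⟩ := hb a (by simp)
          have hlt : ∀ x ∈ js', a < x := (List.pairwise_cons.mp hp).1
          rcases Nat.eq_or_lt_of_le has with heq | hgt
          · subst heq
            exact List.Sublist.cons₂ _ (ih (s+1) js' hp.of_cons
                (fun x hx => ⟨hlt x hx, by have := (hb x (by simp [hx])).2; omega⟩))
          · exact List.Sublist.cons _ (ih (s+1) (a :: js') hp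
              (fun x hx => by
                rcases List.mem_cons.mp hx with rfl | hx'
                · exact ⟨hgt, by omega⟩
                · exact ⟨by have := hlt x hx'; omega,
                    by have := (hb x (by simp [hx'])).2; omega⟩))

lemma pv_sublist_range (js : List Nat) (n : Nat) (h1 : js.Pairwise (· < ·))
    (h2 : ∀ x ∈ js, x < n) : js.Sublist (List.range n) := by
  rw [List.range_eq_range']
  exact pv_sublist_range'_aux n 0 js h1 (fun x hx => ⟨Nat.zero_le x, by simpa using h2 x hx⟩)

lemma pv_combinations_sorted (l : List Nat) : ∀ (i : Nat), l.Pairwise (· < ·) →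
    (PySem.List.combinations l i).Pairwise (fun a b => pvIdxLt a b = true) := by
  induction l with
  | nil =>
      intro i _
      cases i with
      | zero => simp [PySem.List.combinations_zero]
      | succ r => simp [PySem.List.combinations_nil_succ]
  | cons x xs ih =>
      intro i hp
      cases i with
      | zero => simp [PySem.List.combinations_zero]
      | succ r =>
          rw [PySem.List.combinations_cons_succ]
          have hxlt : ∀ y ∈ xs, x < y := (List.pairwise_cons.mp hp).1
          have htail := hp.of_cons
          refine List.pairwise_append.mpr ⟨?_, ih (r+1) htail, ?_⟩
          · rw [List.pairwise_map]
            refine (ih r htail).imp ?_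
            intro a b hab
            simpa [pvIdxLt] using hab
          · intro c1 h1 c2 h2
            obtain ⟨a, ha, rfl⟩ := List.mem_map.mp h1
            have hlen2 : c2.length = r + 1 := PySem.List.length_of_mem_combinations h2
            cases c2 with
            | nil => simp at hlen2
            | cons y c2' =>
                have hy : y ∈ xs := by
                  have := PySem.List.sublist_of_mem_combinations h2
                  exact this.subset (by simp)
                simp [pvIdxLt, hxlt y hy]

lemma pv_find?_sorted {α : Type} {R : α → α → Prop} : ∀ {L : List α}, L.Pairwise R →
    ∀ {q : α → Bool} {x : α}, L.find? q = some x →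
    q x = true ∧ x ∈ L ∧ ∀ y ∈ L, q y = true → x = y ∨ R x y := by
  intro L
  induction L with
  | nil => intro _ q x h; simp at h
  | cons a L ih =>
      intro hp q x h
      rw [List.find?_cons] at h
      obtain ⟨hra, hptail⟩ := List.pairwise_cons.mp hp
      by_cases hqa : q a
      · simp only [hqa, if_pos] at h
        · injection h with h; subst h
          refine ⟨hqa, by simp, ?_⟩
          intro y hy hqy
          rcases List.mem_cons.mp hy with rfl | hy'
          · exact Or.inl rfl
          · exact Or.inr (hra y hy')
      · simp only [hqa] at h
        obtain ⟨h1, h2, h3⟩ := ih hptail h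
        refine ⟨h1, by simp [h2], ?_⟩
        intro y hy hqy
        rcases List.mem_cons.mp hy with rfl | hy'
        · exact absurd hqy (by simpa using hqa)
        · exact h3 y hy' hqy

lemma pv_map_sel (words : List String) :
    words = (List.range words.length).map (fun j => words.getD j "") := by
  apply List.ext_getElem
  · simp
  · intro i h1 h2
    simp [List.getD_eq_getElem?_getD, List.getElem?_eq_getElem h1]

lemma pvGreedy_sound : ∀ (ws t : List String) (j : Nat) (js : List Nat),
    pvGreedy t ws j = some js →
    js.map (fun x => ws.getD (x - j) "") = t ∧ js.Pairwise (· < ·) ∧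
      ∀ x ∈ js, j ≤ x ∧ x < j + ws.length := by
  intro ws
  induction ws with
  | nil =>
      intro t j js h
      cases t with
      | nil => simp [pvGreedy] at h; subst h; simp
      | cons t0 ts => simp [pvGreedy] at h
  | cons w ws' ih =>
      intro t j js h
      cases t with
      | nil =>
          simp [pvGreedy] at h; subst h; simp
      | cons t0 ts =>
          simp only [pvGreedy] at h
          by_cases hw : w = t0
          · rw [if_pos hw] at h
            obtain ⟨js', hjs', rfl⟩ := Option.map_eq_some_iff.mp h
            obtain ⟨hmap, hpair, hbnd⟩ := ih ts (j+1) js' hjs'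
            refine ⟨?_, ?_, ?_⟩
            · simp only [List.map_cons, Nat.sub_self, List.getD_cons_zero, hw]
              congr 1
              rw [← hmap]
              apply List.map_congr_left
              intro x hx
              have h1 : j + 1 ≤ x := (hbnd x hx).1
              have : x - j = (x - (j+1)) + 1 := by omega
              rw [this, List.getD_cons_succ]
            · exact List.pairwise_cons.mpr ⟨fun x hx => by have := (hbnd x hx).1; omega, hpair⟩
            · intro x hx
              rcases List.mem_cons.mp hx with rfl | hx'
              · simp only [List.length_cons]; omega
              · have := hbnd x hx'; simp only [List.length_cons] at this ⊢; omega
          · rw [if_neg hw] at h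
            obtain ⟨hmap, hpair, hbnd⟩ := ih (t0 :: ts) (j+1) js h
            refine ⟨?_, hpair, ?_⟩
            · rw [← hmap]
              apply List.map_congr_left
              intro x hx
              have h1 : j + 1 ≤ x := (hbnd x hx).1
              have : x - j = (x - (j+1)) + 1 := by omega
              rw [this, List.getD_cons_succ]
            · intro x hx
              have := hbnd x hx; simp; omega

lemma pvGreedy_min : ∀ (ws t : List String) (j : Nat) (js js' : List Nat),
    pvGreedy t ws j = some js → js'.Pairwise (· < ·) → (∀ x ∈ js', j ≤ x) →
    js'.map (fun x => ws.getD (x - j) "") = t → pvIdxLt js' js = false := by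
  intro ws
  induction ws with
  | nil =>
      intro t j js js' h hp hb hm
      cases t with
      | nil =>
          simp [pvGreedy] at h; subst h
          cases js' <;> simp [pvIdxLt]
      | cons t0 ts => simp [pvGreedy] at h
  | cons w ws' ih =>
      intro t j js js' h hp hb hm
      cases t with
      | nil =>
          simp [pvGreedy] at h; subst h
          cases js' <;> simp [pvIdxLt]
      | cons t0 ts =>
          obtain ⟨x, js'', rfl⟩ : ∃ x js'', js' = x :: js'' := by
            cases js' with
            | nil => simp at hm
            | cons a b => exact ⟨a, b, rfl⟩
          have hxj : j ≤ x := hb x (by simp)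
          have hmx : (w :: ws').getD (x - j) "" = t0 := by
            simpa using congrArg (fun l => l.headD "") hm
          have hmtail : js''.map (fun y => (w :: ws').getD (y - j) "") = ts := by
            simpa using congrArg List.tail hm
          have hgt : ∀ y ∈ js'', x < y := (List.pairwise_cons.mp hp).1
          have htail_shift : ∀ (zs : List Nat), (∀ y ∈ zs, j + 1 ≤ y) →
              zs.map (fun y => (w :: ws').getD (y - j) "") = zs.map (fun y => ws'.getD (y - (j+1)) "") := by
            intro zs hz
            apply List.map_congr_left
            intro y hy
            have : y - j = (y - (j+1)) + 1 := by have := hz y hy; omega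
            rw [this, List.getD_cons_succ]
          simp only [pvGreedy] at h
          by_cases hw : w = t0
          · rw [if_pos hw] at h
            obtain ⟨js₀, hjs₀, rfl⟩ := Option.map_eq_some_iff.mp h
            simp only [pvIdxLt, Bool.or_eq_false_iff, Bool.and_eq_false_iff]
            by_cases hxeq : x = j
            · subst hxeq
              refine ⟨by simp, Or.inr ?_⟩
              refine ih ts (x+1) js₀ js'' hjs₀ hp.of_cons (fun y hy => by have := hgt y hy; omega) ?_
              rw [← htail_shift js'' (fun y hy => by have := hgt y hy; omega)]
              exact hmtail
            · have hxgt : j < x := by omega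
              refine ⟨by simp; omega, Or.inl (by simpa using fun h => absurd h hxeq)⟩
          · rw [if_neg hw] at h
            have hxne : x ≠ j := by
              intro hxe; subst hxe
              simp at hmx
              exact hw hmx
            have hxgt : j + 1 ≤ x := by omega
            have : (x :: js'').map (fun y => ws'.getD (y - (j+1)) "") = t0 :: ts := by
              rw [← htail_shift (x :: js'') (fun y hy => by
                rcases List.mem_cons.mp hy with rfl | hy' <;> [omega; skip]
                have := hgt y hy'; omega)]
              exact hm
            exact ih (t0 :: ts) (j+1) js (x :: js'') h hp
              (fun y hy => by
                rcases List.mem_cons.mp hy with rfl | hy' <;> [omega; skip]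
                have := hgt y hy'; omega) this

lemma pvGreedy_complete : ∀ (ws t : List String) (j : Nat) (js' : List Nat),
    js'.Pairwise (· < ·) → (∀ x ∈ js', j ≤ x ∧ x < j + ws.length) →
    js'.map (fun x => ws.getD (x - j) "") = t → (pvGreedy t ws j).isSome := by
  intro ws
  induction ws with
  | nil =>
      intro t j js' hp hb hm
      cases js' with
      | nil => subst hm; simp [pvGreedy]
      | cons a b =>
          obtain ⟨h1, h2⟩ := hb a (by simp)
          simp only [List.length_nil] at h2
          omega
  | cons w ws' ih =>
      intro t j js' hp hb hm
      cases js' with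
      | nil => subst hm; simp [pvGreedy]
      | cons x js'' =>
          obtain ⟨t0, ts, hteq⟩ : ∃ t0 ts, t = t0 :: ts := by
            cases t with
            | nil => simp at hm
            | cons a b => exact ⟨a, b, rfl⟩
          subst hteq
          have hxj : j ≤ x := (hb x (by simp)).1
          have hmx : (w :: ws').getD (x - j) "" = t0 := by
            simpa using congrArg (fun l => l.headD "") hm
          have hmtail : js''.map (fun y => (w :: ws').getD (y - j) "") = ts := by
            simpa using congrArg List.tail hm
          have hgt : ∀ y ∈ js'', x < y := (List.pairwise_cons.mp hp).1
          have htail_shift : ∀ (zs : List Nat), (∀ y ∈ zs, j + 1 ≤ y) →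
              zs.map (fun y => (w :: ws').getD (y - j) "") = zs.map (fun y => ws'.getD (y - (j+1)) "") := by
            intro zs hz
            apply List.map_congr_left
            intro y hy
            have : y - j = (y - (j+1)) + 1 := by have := hz y hy; omega
            rw [this, List.getD_cons_succ]
          simp only [pvGreedy]
          by_cases hw : w = t0
          · rw [if_pos hw]
            rw [Option.isSome_map]
            by_cases hxeq : x = j
            · subst hxeq
              refine ih ts (x+1) js'' hp.of_cons (fun y hy => ⟨by have := hgt y hy; omega,
                by have := (hb y (by simp [hy])).2; simp at this ⊢; omega⟩) ?_
              rw [← htail_shift js'' (fun y hy => by have := hgt y hy; omega)]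
              exact hmtail
            · -- match at x > j: the tail list js'' also works for ts at offset x+1 ≥ j+1
              refine ih ts (j+1) js'' hp.of_cons (fun y hy => ⟨by have := hgt y hy; omega,
                by have := (hb y (by simp [hy])).2; simp at this ⊢; omega⟩) ?_
              rw [← htail_shift js'' (fun y hy => by have := hgt y hy; omega)]
              exact hmtail
          · rw [if_neg hw]
            have hxne : x ≠ j := by
              intro hxe; subst hxe; simp at hmx; exact hw hmx
            refine ih (t0 :: ts) (j+1) (x :: js'') hp (fun y hy => ?_) ?_
            · rcases List.mem_cons.mp hy with rfl | hy'
              · refine ⟨by omega, by have := (hb y (by simp)).2; simp at this ⊢; omega⟩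
              · exact ⟨by have := hgt y hy'; omega,
                  by have := (hb y (by simp [hy'])).2; simp at this ⊢; omega⟩
            · rw [← htail_shift (x :: js'') (fun y hy => by
                rcases List.mem_cons.mp hy with rfl | hy' <;> [omega; skip]
                have := hgt y hy'; omega)]
              exact hm

lemma pv_str_split₀_good (s : String) : ∀ w ∈ PySem.Str.split₀ s, pvGoodW w.toList := by
  intro w hw
  apply pv_split₀_good s.toList
  rw [← PySem.Str.split₀_map_toList]
  exact List.mem_map_of_mem hw

lemma pv_str_roundtrip (ws : List String) (h : ∀ w ∈ ws, pvGoodW w.toList) :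
    PySem.Str.split₀ (pvJoin ws) = ws := by
  have h1 : (pvJoin ws).toList = PySem.Chars.join [' '] (ws.map String.toList) := by
    unfold pvJoin
    rw [PySem.Str.toList_join]
    rfl
  have h2 : (PySem.Str.split₀ (pvJoin ws)).map String.toList = ws.map String.toList := by
    rw [PySem.Str.split₀_map_toList, h1]
    apply pv_roundtrip
    intro p hp
    obtain ⟨w, hw, rfl⟩ := List.mem_map.mp hp
    exact h w hw
  have : Function.Injective String.toList := fun a b hab => String.toList_inj.mp hab
  exact List.map_injective_iff.mpr this h2

lemma pv_step_eq (rem : List String) (w : String) :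
    (if rem.contains w then (PySem.List.remove? rem w).getD rem else rem)
      = (PySem.List.remove? rem w).getD rem := by
  by_cases h : rem.contains w
  · rw [if_pos h]
  · rw [if_neg h]
    have : List.idxOf? w rem = none := by
      rw [List.idxOf?_eq_none_iff]
      simpa using h
    simp [PySem.List.remove?, this]

lemma pvRankLt_asymm {a b : Nat × List Nat} (h : pvRankLt a b = true) : pvRankLt b a = false := by
  cases hr : pvRankLt b a with
  | false => rfl
  | true =>
      exfalso
      simp only [pvRankLt, Bool.or_eq_true, Bool.and_eq_true, beq_iff_eq,
        decide_eq_true_eq] at h hr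
      rcases h with h | ⟨he, h⟩ <;> rcases hr with hr | ⟨hre, hr⟩
      · omega
      · omega
      · omega
      · have := pvIdxLt_trans h hr
        simp [pvIdxLt_irrefl] at this

lemma pvBestStep_not_cand {words : List String} {k : String} (acc)
    (h : ∀ js, ¬ pvIsCand words k js) : pvBestStep words acc k = acc := by
  unfold pvBestStep
  by_cases h1 : (PySem.Str.split₀ k).isEmpty || pvJoin (PySem.Str.split₀ k) ≠ k
  · simp only [h1, if_true]
  · simp only [h1, if_false]
    cases hg : pvGreedy (PySem.Str.split₀ k) words 0 with
    | none => rfl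
    | some js =>
        exfalso
        apply h js
        simp only [Bool.or_eq_true, decide_eq_true_eq, not_or] at h1
        exact ⟨by simpa [List.isEmpty_iff] using h1.1, by simpa using h1.2, hg⟩

lemma pvBestAux_spec (words : List String) : ∀ (l : List String)
    (acc : Option (String × List String × Nat × List Nat)),
    (∀ b0, acc = some b0 → pvGoodCand words b0) →
    (match l.foldl (pvBestStep words) acc with
     | none => acc = none ∧ ∀ k ∈ l, ∀ js, ¬ pvIsCand words k js
     | some b => pvGoodCand words b ∧ (b.1 ∈ l ∨ acc = some b) ∧
         (∀ k ∈ l, ∀ js, pvIsCand words k js →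
            pvRankLt ((PySem.Str.split₀ k).length, js) (b.2.2.1, b.2.2.2) = false) ∧
         (∀ b0, acc = some b0 → pvRankLt (b0.2.2.1, b0.2.2.2) (b.2.2.1, b.2.2.2) = false)) := by
  intro l
  induction l with
  | nil =>
      intro acc hacc
      cases acc with
      | none => exact ⟨rfl, by simp⟩
      | some b0 =>
          refine ⟨hacc b0 rfl, Or.inr rfl, by simp, ?_⟩
          intro b1 hb1
          injection hb1 with hb1; subst hb1
          exact pvRankLt_irrefl _
  | cons k l ih =>
      intro acc hacc
      rw [List.foldl_cons]
      by_cases hk : ∃ js, pvIsCand words k js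
      · obtain ⟨js, hjs⟩ := hk
        obtain ⟨hne, hjoin, hgreedy⟩ := hjs
        have hGoodNew : pvGoodCand words (k, PySem.Str.split₀ k, (PySem.Str.split₀ k).length, js) :=
          ⟨rfl, rfl, hne, hjoin, hgreedy⟩
        have hcand_unique : ∀ js', pvIsCand words k js' → js' = js := by
          intro js' h'
          have := h'.2.2.symm.trans hgreedy
          injection this
        cases acc with
        | none =>
            have hstep : pvBestStep words none k
                = some (k, PySem.Str.split₀ k, (PySem.Str.split₀ k).length, js) := by
              unfold pvBestStep
              rw [if_neg (by simp [List.isEmpty_iff, hne, hjoin]), hgreedy]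
            rw [hstep]
            have := ih (some (k, PySem.Str.split₀ k, (PySem.Str.split₀ k).length, js))
              (by intro b0 hb0; injection hb0 with hb0; subst hb0; exact hGoodNew)
            cases hres : l.foldl (pvBestStep words) (some (k, PySem.Str.split₀ k, (PySem.Str.split₀ k).length, js)) with
            | none => rw [hres] at this; exact absurd this.1 (by simp)
            | some b =>
                rw [hres] at this
                obtain ⟨hg, hmem, hmin, hmono⟩ := this
                refine ⟨hg, ?_, ?_, by simp⟩
                · rcases hmem with h | h
                  · exact Or.inl (by simp [h])
                  · injection h with h; subst h; exact Or.inl (by simp)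
                · intro k' hk' js' hc'
                  rcases List.mem_cons.mp hk' with rfl | hk''
                  · rw [hcand_unique js' hc']
                    exact hmono _ rfl
                  · exact hmin k' hk'' js' hc'
        | some b0 =>
            have hstep : pvBestStep words (some b0) k
                = if pvRankLt ((PySem.Str.split₀ k).length, js) (b0.2.2.1, b0.2.2.2)
                  then some (k, PySem.Str.split₀ k, (PySem.Str.split₀ k).length, js)
                  else some b0 := by
              unfold pvBestStep
              rw [if_neg (by simp [List.isEmpty_iff, hne, hjoin]), hgreedy]
            rw [hstep]
            have hgb0 := hacc b0 rfl
            by_cases hcmp : pvRankLt ((PySem.Str.split₀ k).length, js) (b0.2.2.1, b0.2.2.2) = true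
            · rw [if_pos hcmp]
              have := ih (some (k, PySem.Str.split₀ k, (PySem.Str.split₀ k).length, js))
                (by intro b1 hb1; injection hb1 with hb1; subst hb1; exact hGoodNew)
              cases hres : l.foldl (pvBestStep words) (some (k, PySem.Str.split₀ k, (PySem.Str.split₀ k).length, js)) with
              | none => rw [hres] at this; exact absurd this.1 (by simp)
              | some b =>
                  rw [hres] at this
                  obtain ⟨hg, hmem, hmin, hmono⟩ := this
                  have hnewb : pvRankLt ((PySem.Str.split₀ k).length, js) (b.2.2.1, b.2.2.2) = false :=
                    hmono _ rfl
                  refine ⟨hg, ?_, ?_, ?_⟩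
                  · rcases hmem with h | h
                    · exact Or.inl (by simp [h])
                    · injection h with h; subst h; exact Or.inl (by simp)
                  · intro k' hk' js' hc'
                    rcases List.mem_cons.mp hk' with rfl | hk''
                    · rw [hcand_unique js' hc']; exact hnewb
                    · exact hmin k' hk'' js' hc'
                  · intro b1 hb1
                    injection hb1 with hb1; subst hb1
                    exact pvRankLt_not_lt_trans (pvRankLt_asymm hcmp) hnewb
            · rw [if_neg (by simpa using hcmp)]
              have hkeep : pvRankLt ((PySem.Str.split₀ k).length, js) (b0.2.2.1, b0.2.2.2) = false := by
                simpa using hcmp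
              have := ih (some b0) hacc
              cases hres : l.foldl (pvBestStep words) (some b0) with
              | none => rw [hres] at this; exact absurd this.1 (by simp)
              | some b =>
                  rw [hres] at this
                  obtain ⟨hg, hmem, hmin, hmono⟩ := this
                  have hb0b : pvRankLt (b0.2.2.1, b0.2.2.2) (b.2.2.1, b.2.2.2) = false := hmono _ rfl
                  refine ⟨hg, ?_, ?_, ?_⟩
                  · rcases hmem with h | h
                    · exact Or.inl (by simp [h])
                    · exact Or.inr h
                  · intro k' hk' js' hc'
                    rcases List.mem_cons.mp hk' with rfl | hk''
                    · rw [hcand_unique js' hc']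
                      exact pvRankLt_not_lt_trans hkeep hb0b
                    · exact hmin k' hk'' js' hc'
                  · intro b1 hb1
                    injection hb1 with hb1; subst hb1
                    exact hb0b
      · push_neg at hk
        rw [pvBestStep_not_cand acc hk]
        have := ih acc hacc
        cases hres : l.foldl (pvBestStep words) acc with
        | none =>
            rw [hres] at this
            refine ⟨this.1, ?_⟩
            intro k' hk' js hc
            rcases List.mem_cons.mp hk' with rfl | hk''
            · exact hk js hc
            · exact this.2 k' hk'' js hc
        | some b =>
            rw [hres] at this
            obtain ⟨hg, hmem, hmin, hmono⟩ := this
            refine ⟨hg, ?_, ?_, hmono⟩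
            · rcases hmem with h | h
              · exact Or.inl (by simp [h])
              · exact Or.inr h
            · intro k' hk' js' hc'
              rcases List.mem_cons.mp hk' with rfl | hk''
              · exact absurd hc' (hk js')
              · exact hmin k' hk'' js' hc'

lemma pvBest_none {words keys : List String} (h : pvBest words keys = none) :
    ∀ k ∈ keys, ∀ js, ¬ pvIsCand words k js := by
  have := pvBestAux_spec words keys none (by simp)
  rw [pvBest] at h
  rw [h] at this
  exact this.2

lemma pvBest_some {words keys : List String} {b : String × List String × Nat × List Nat}
    (h : pvBest words keys = some b) :
    b.1 ∈ keys ∧ pvGoodCand words b ∧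
      ∀ k ∈ keys, ∀ js, pvIsCand words k js →
        pvRankLt ((PySem.Str.split₀ k).length, js) (b.2.2.1, b.2.2.2) = false := by
  have := pvBestAux_spec words keys none (by simp)
  rw [pvBest] at h
  rw [h] at this
  obtain ⟨hg, hmem, hmin, _⟩ := this
  refine ⟨?_, hg, hmin⟩
  rcases hmem with h' | h'
  · exact h'
  · simp at h'

lemma pv_remove_eq (words t : List String) : pvRemoveGuard words t = pvEraseAll words t := by
  unfold pvRemoveGuard pvEraseAll
  congr 1
  funext rem w
  exact pv_step_eq rem w

-- D1: a successful combination yields a B-side candidate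
lemma pv_cand_of_pred {keys keys' words : List String}
    (hmem : ∀ x : String, x ∈ keys' ↔ x ∈ keys)
    (hgood : ∀ w ∈ words, pvGoodW w.toList) {c : List String}
    (hc : c.Sublist words) (hne : c ≠ [])
    (hp : keys'.contains (pvJoin c) = true) :
    PySem.Str.split₀ (pvJoin c) = c ∧ pvJoin c ∈ keys ∧
      ∃ js, pvIsCand words (pvJoin c) js := by
  have hk : pvJoin c ∈ keys := (hmem _).mp (by simpa using hp)
  have hsplit : PySem.Str.split₀ (pvJoin c) = c :=
    pv_str_roundtrip c (fun w hw => hgood w (hc.subset hw))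
  refine ⟨hsplit, hk, ?_⟩
  have hcmem : c ∈ PySem.List.combinations words c.length :=
    (PySem.List.mem_combinations_iff _ _ _).mpr ⟨hc, rfl⟩
  rw [pv_map_sel words, PySem.List.combinations_map] at hcmem
  obtain ⟨ix, hixmem, hixsel⟩ := List.mem_map.mp hcmem
  obtain ⟨hixsub, hixlen⟩ := (PySem.List.mem_combinations_iff _ _ _).mp hixmem
  have hixpair : ix.Pairwise (· < ·) := List.pairwise_lt_range.sublist hixsub
  have hixbnd : ∀ x ∈ ix, x < words.length := fun x hx =>
    List.mem_range.mp (hixsub.subset hx)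
  have hsome := pvGreedy_complete words c 0 ix hixpair
    (fun x hx => ⟨Nat.zero_le x, by have := hixbnd x hx; omega⟩)
    (by simpa using hixsel)
  obtain ⟨js, hjs⟩ := Option.isSome_iff_exists.mp hsome
  refine ⟨js, ?_⟩
  unfold pvIsCand
  rw [hsplit]
  exact ⟨hne, rfl, hjs⟩

lemma pvComboScan_cons (keys words : List String) (i : Nat) (rest : List Nat) :
    pvComboScan keys words (i :: rest)
      = match (PySem.List.combinations words i).find? (fun c => keys.contains (pvJoin c)) with
        | some c => (some (pvJoin c), some (PySem.Str.strip (pvJoin (pvRemoveGuard words c))))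
        | none => pvComboScan keys words rest := rfl

lemma pvComboScan_all_none {keys words : List String} : ∀ (l : List Nat),
    (∀ i ∈ l, (PySem.List.combinations words i).find? (fun c => keys.contains (pvJoin c)) = none) →
    pvComboScan keys words l = (none, none) := by
  intro l
  induction l with
  | nil => intro _; rfl
  | cons i rest ih =>
      intro h
      rw [pvComboScan_cons, h i (by simp)]
      exact ih (fun j hj => h j (by simp [hj]))

lemma pvComboScan_append {keys words : List String} : ∀ (l1 l2 : List Nat),
    (∀ i ∈ l1, (PySem.List.combinations words i).find? (fun c => keys.contains (pvJoin c)) = none) →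
    pvComboScan keys words (l1 ++ l2) = pvComboScan keys words l2 := by
  intro l1
  induction l1 with
  | nil => intro l2 _; rfl
  | cons i rest ih =>
      intro l2 h
      rw [List.cons_append, pvComboScan_cons, h i (by simp)]
      exact ih l2 (fun j hj => h j (by simp [hj]))

lemma pv_multiline (keys keys' words : List String)
    (hmem : ∀ x : String, x ∈ keys' ↔ x ∈ keys)
    (hgood : ∀ w ∈ words, pvGoodW w.toList) :
    pvComboScan keys' words (List.range' 1 words.length)
      = (match pvBest words keys with
         | some (k, t, _, _) => (some k, some (PySem.Str.strip (pvJoin (pvEraseAll words t))))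
         | none => ((none : Option String), (none : Option String))) := by
  cases hb : pvBest words keys with
  | none =>
      apply pvComboScan_all_none
      intro i hi
      have hi1 : 1 ≤ i := by
        have := List.mem_range'_1.mp hi
        omega
      cases hfind : (PySem.List.combinations words i).find? (fun c => keys'.contains (pvJoin c)) with
      | none => rfl
      | some c =>
          exfalso
          have hpred := List.find?_some (p := fun c => keys'.contains (pvJoin c)) hfind
          have hcmem := List.mem_of_find?_eq_some hfind
          obtain ⟨hcsub, hclen⟩ := (PySem.List.mem_combinations_iff _ _ _).mp hcmem
          have hcne : c ≠ [] := by
            intro h; rw [h] at hclen; simp at hclen; omega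
          obtain ⟨_, hk, js, hcand⟩ := pv_cand_of_pred hmem hgood hcsub hcne hpred
          exact pvBest_none hb _ hk js hcand
  | some b =>
      obtain ⟨k0, t0, r0, js0⟩ := b
      obtain ⟨hbkeys, ⟨hbt, hbl, hcand⟩, hmin⟩ := pvBest_some hb
      simp only at hbkeys hbt hbl hcand hmin
      subst hbt
      subst hbl
      obtain ⟨htne, hjoin, hgreedy⟩ := hcand
      obtain ⟨hmap0, hpair, hbnd⟩ := pvGreedy_sound words _ 0 _ hgreedy
      have hmap : js0.map (fun x => words.getD x "") = PySem.Str.split₀ k0 := by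
        rw [← hmap0]; apply List.map_congr_left; intro x _; simp
      set n := words.length with hn
      have hjsbnd : ∀ x ∈ js0, x < n := fun x hx => by have := (hbnd x hx).2; omega
      have hjssub : js0.Sublist (List.range n) := pv_sublist_range js0 n hpair hjsbnd
      have hlen : js0.length = (PySem.Str.split₀ k0).length := by rw [← hmap]; simp
      have histar : 1 ≤ (PySem.Str.split₀ k0).length := by
        cases h : PySem.Str.split₀ k0 with
        | nil => exact absurd h htne
        | cons a l => simp [h]
      have hile : (PySem.Str.split₀ k0).length ≤ n := by
        rw [← hlen]
        simpa using hjssub.length_le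
      have hlow : ∀ i ∈ List.range' 1 ((PySem.Str.split₀ k0).length - 1),
          (PySem.List.combinations words i).find? (fun c => keys'.contains (pvJoin c)) = none := by
        intro i hi
        have hi2 : 1 ≤ i ∧ i < (PySem.Str.split₀ k0).length := by
          have := List.mem_range'_1.mp hi
          omega
        cases hfind : (PySem.List.combinations words i).find? (fun c => keys'.contains (pvJoin c)) with
        | none => rfl
        | some c =>
            exfalso
            have hpred := List.find?_some (p := fun c => keys'.contains (pvJoin c)) hfind
            have hcmem := List.mem_of_find?_eq_some hfind
            obtain ⟨hcsub, hclen⟩ := (PySem.List.mem_combinations_iff _ _ _).mp hcmem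
            have hcne : c ≠ [] := by
              intro h; rw [h] at hclen; simp at hclen; omega
            obtain ⟨hsplitc, hkmem, js1, hcand1⟩ := pv_cand_of_pred hmem hgood hcsub hcne hpred
            have hmv := hmin _ hkmem js1 hcand1
            rw [hsplitc, hclen] at hmv
            simp only [pvRankLt, Bool.or_eq_false_iff, decide_eq_false_iff_not] at hmv
            exact hmv.1 hi2.2
      have hfindstar :
          (PySem.List.combinations words ((PySem.Str.split₀ k0).length)).find?
              (fun c => keys'.contains (pvJoin c)) = some (PySem.Str.split₀ k0) := by
        have hrw : PySem.List.combinations words ((PySem.Str.split₀ k0).length)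
            = (PySem.List.combinations (List.range n) ((PySem.Str.split₀ k0).length)).map
                (List.map (fun j => words.getD j "")) := by
          conv_lhs => rw [pv_map_sel words]
          rw [PySem.List.combinations_map]
        rw [hrw, List.find?_map]
        have hjsmem : js0 ∈ PySem.List.combinations (List.range n) ((PySem.Str.split₀ k0).length) :=
          (PySem.List.mem_combinations_iff _ _ _).mpr ⟨hjssub, hlen⟩
        have hpredjs : ((fun c => keys'.contains (pvJoin c)) ∘
            (List.map (fun j => words.getD j ""))) js0 = true := by
          simp only [Function.comp_apply]
          rw [hmap, hjoin]
          simpa using (hmem k0).mpr hbkeys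
        cases hfind : (PySem.List.combinations (List.range n) ((PySem.Str.split₀ k0).length)).find?
            ((fun c => keys'.contains (pvJoin c)) ∘ (List.map (fun j => words.getD j ""))) with
        | none =>
            exact absurd hpredjs (by simpa using List.find?_eq_none.mp hfind js0 hjsmem)
        | some x =>
            obtain ⟨hqx, hxmem, hxmin⟩ :=
              pv_find?_sorted (pv_combinations_sorted (List.range n) _ List.pairwise_lt_range) hfind
            have hxjs : x = js0 := by
              rcases hxmin js0 hjsmem hpredjs with h | hlex
              · exact h
              · exfalso
                obtain ⟨hxsub, hxlen⟩ := (PySem.List.mem_combinations_iff _ _ _).mp hxmem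
                have hxpair : x.Pairwise (· < ·) := List.pairwise_lt_range.sublist hxsub
                have hcsub : (x.map (fun j => words.getD j "")).Sublist words := by
                  conv_rhs => rw [pv_map_sel words]
                  exact hxsub.map _
                have hclen : (x.map (fun j => words.getD j "")).length
                    = (PySem.Str.split₀ k0).length := by simp [hxlen]
                have hcne : x.map (fun j => words.getD j "") ≠ [] := by
                  intro h
                  rw [h] at hclen
                  simp at hclen
                  omega
                have hpredc : keys'.contains (pvJoin (x.map (fun j => words.getD j ""))) = true := hqx
                obtain ⟨hsplitc, hkmem, js2, hcand2⟩ :=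
                  pv_cand_of_pred hmem hgood hcsub hcne hpredc
                have hmv := hmin _ hkmem js2 hcand2
                rw [hsplitc, hclen] at hmv
                have hidx : pvIdxLt js2 js0 = false := by
                  simp only [pvRankLt, Bool.or_eq_false_iff, Bool.and_eq_false_iff,
                    beq_eq_false_iff_ne, decide_eq_false_iff_not] at hmv
                  rcases hmv.2 with h | h
                  · exact absurd rfl h
                  · exact h
                have hg2 : pvGreedy (x.map (fun j => words.getD j "")) words 0 = some js2 := by
                  have := hcand2.2.2
                  rwa [hsplitc] at this
                have hgm : pvIdxLt x js2 = false :=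
                  pvGreedy_min words _ 0 js2 x hg2 hxpair (fun y _ => Nat.zero_le y)
                    (by apply List.map_congr_left; intro y _; simp)
                rcases pvIdxLt_tricho hgm with h | h
                · rw [← h] at hidx
                  simp [hlex] at hidx
                · have := pvIdxLt_trans h hlex
                  simp [this] at hidx
            rw [hxjs]
            simp only [Option.map_some]
            rw [hmap]
      have hsplitrange : List.range' 1 n
          = List.range' 1 ((PySem.Str.split₀ k0).length - 1)
              ++ List.range' ((PySem.Str.split₀ k0).length) (n - (PySem.Str.split₀ k0).length + 1) := by
        have h0 : List.range' 1 ((PySem.Str.split₀ k0).length - 1) 1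
              ++ List.range' (1 + 1 * ((PySem.Str.split₀ k0).length - 1))
                  (n - (PySem.Str.split₀ k0).length + 1) 1
            = List.range' 1 (((PySem.Str.split₀ k0).length - 1)
                + (n - (PySem.Str.split₀ k0).length + 1)) 1 := List.range'_append
        have h1 : 1 + 1 * ((PySem.Str.split₀ k0).length - 1) = (PySem.Str.split₀ k0).length := by
          omega
        have h2 : ((PySem.Str.split₀ k0).length - 1) + (n - (PySem.Str.split₀ k0).length + 1) = n := by
          omega
        rw [h1, h2] at h0
        exact h0.symm
      have hsucc : List.range' ((PySem.Str.split₀ k0).length) (n - (PySem.Str.split₀ k0).length + 1)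
          = (PySem.Str.split₀ k0).length
              :: List.range' ((PySem.Str.split₀ k0).length + 1) (n - (PySem.Str.split₀ k0).length) := by
        rw [List.range'_succ]
      rw [hsplitrange, pvComboScan_append _ _ hlow, hsucc, pvComboScan_cons, hfindstar]
      simp only [pv_remove_eq, hjoin]

-- ===== VERDICT (by name: the statement is the Claim_ definition above) =====
theorem clean_kv_spec : Claim_equal_clean_kv := by
  intro entry keys _
  unfold Spec_clean_kv clean_kv clean_kv_alt
  by_cases he : entry = ""
  · simp [he]
  · simp only [he, if_false]
    set lines := (PySem.Str.split? entry "\n").getD [] with hl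
    by_cases h1 : lines.length = 1
    · simp [h1]
    · simp only [h1, if_false]
      exact pv_multiline keys _ _
        (fun x => (PySem.List.sorted_perm keys (fun k => PySem.Str.len k) true).mem_iff)
        (pv_str_split₀_good _)
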